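-- pv_equiv track=rewrite | github.com/RobbeW/Data_Statistiek_R | Deel 3 Algoritmiek/04 Gretige algoritmen/12 Perfecte koor/solution/solution.nl.py | perfecte_koor
-- ===== SOURCE A (Python) =====
-- def perfecte_koor(toonhoogtes):
--     n = len(toonhoogtes)
--     som = 0
--     for toon in toonhoogtes:
--         som += toon
--
--     if som % n != 0:
--         resultaat = -1
--     else:
--         gemiddelde = som // n
--         resultaat = 0
--         for toon in toonhoogtes:
--             resultaat += abs(toon - gemiddelde)
--         resultaat = resultaat // 2 + 1
--
--     return resultaat
-- ===== SOURCE B (Python) =====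
-- def perfecte_koor(toonhoogtes):
--     n = len(toonhoogtes)
--     som = sum(toonhoogtes)
--     if som % n != 0:
--         return -1
--     gemiddelde = som // n
--     tekort = 0
--     for toon in sorted(toonhoogtes):
--         if toon >= gemiddelde:
--             break
--         tekort += gemiddelde - toon
--     return tekort + 1
-- ===== Notes on version B (the rewrite author's own statement) =====
-- stated objective: alternative
-- what changed: B sorts the pitches and greedily scans only the ascending prefix below the mean, accumulating the total deficit (which equals half the absolute-deviation sum) and breaking at the first tone >= mean, instead of A's single unsorted pass over all absolute deviations followed by halving.
import Mathlib
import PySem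

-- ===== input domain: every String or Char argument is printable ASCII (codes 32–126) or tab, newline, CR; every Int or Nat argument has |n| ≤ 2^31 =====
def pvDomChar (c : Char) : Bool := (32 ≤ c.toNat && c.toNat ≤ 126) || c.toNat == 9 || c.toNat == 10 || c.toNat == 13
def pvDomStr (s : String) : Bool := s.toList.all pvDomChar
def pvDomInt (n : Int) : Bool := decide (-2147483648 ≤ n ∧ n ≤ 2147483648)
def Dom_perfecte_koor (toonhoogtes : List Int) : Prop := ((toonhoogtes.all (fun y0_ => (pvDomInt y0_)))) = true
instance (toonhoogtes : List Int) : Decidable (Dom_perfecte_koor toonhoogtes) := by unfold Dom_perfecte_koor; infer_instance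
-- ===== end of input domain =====

-- B sorts the pitches and scans only the ascending prefix below the mean (with a break), summing
-- the deficit, instead of A's single unsorted pass over absolute deviations halved; objective: alternative.


-- ===== PORT A =====
def perfecte_koor (toonhoogtes : List Int) : Int :=
  let n : Int := toonhoogtes.length
  let som : Int := toonhoogtes.foldl (fun acc toon => acc + toon) 0
  if PySem.Int.mod som n ≠ 0 then
    -1
  else
    let gemiddelde := PySem.Int.floordiv som n
    let resultaat : Int := toonhoogtes.foldl (fun acc toon => acc + |toon - gemiddelde|) 0
    PySem.Int.floordiv resultaat 2 + 1

-- ===== PORT B =====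
-- the 'for … break' loop of Source B: stop at the first tone ≥ gemiddelde, else accumulate the deficit
def deficitLoop (g : Int) (acc : Int) : List Int → Int
  | [] => acc
  | toon :: rest => if toon ≥ g then acc else deficitLoop g (acc + (g - toon)) rest

def perfecte_koor_alt (toonhoogtes : List Int) : Int :=
  let n : Int := toonhoogtes.length
  let som : Int := toonhoogtes.sum
  if PySem.Int.mod som n ≠ 0 then
    -1
  else
    let gemiddelde := PySem.Int.floordiv som n
    let tekort := deficitLoop gemiddelde 0 (PySem.List.sorted toonhoogtes (fun x => x) false)
    tekort + 1

-- ===== PRECONDITION & SPEC =====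
-- A raises ZeroDivisionError on the empty list ('som % n' with n = 0); B raises there too.
def Pre_perfecte_koor (toonhoogtes : List Int) : Prop := toonhoogtes ≠ []
instance (toonhoogtes : List Int) : Decidable (Pre_perfecte_koor toonhoogtes) := by
  unfold Pre_perfecte_koor; infer_instance
def pvWitness_perfecte_koor : List Int := [3, 5, 7]
def Spec_perfecte_koor (toonhoogtes : List Int) (out : Int) : Prop := out = perfecte_koor_alt toonhoogtes
instance (toonhoogtes : List Int) (out : Int) : Decidable (Spec_perfecte_koor toonhoogtes out) := by unfold Spec_perfecte_koor; infer_instance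

-- ===== CLAIM =====
def Claim_equal_perfecte_koor : Prop := ∀ (toonhoogtes : List Int), Dom_perfecte_koor toonhoogtes → Pre_perfecte_koor toonhoogtes → Spec_perfecte_koor toonhoogtes (perfecte_koor toonhoogtes)

-- ===== LEMMAS AND PROOFS =====

theorem foldl_add_map_sum (f : Int → Int) (l : List Int) (a : Int) :
    l.foldl (fun acc t => acc + f t) a = a + (l.map f).sum := by
  induction l generalizing a with
  | nil => simp
  | cons x xs ih => simp [List.foldl_cons, ih, add_assoc]

-- on an ascending list the break-loop computes the full deficit sum
theorem deficitLoop_sorted (g : Int) (l : List Int) (a : Int)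
    (h : l.Pairwise (· ≤ ·)) :
    deficitLoop g a l = a + (l.map (fun t => max (g - t) 0)).sum := by
  induction l generalizing a with
  | nil => simp [deficitLoop]
  | cons x xs ih =>
      rcases List.pairwise_cons.mp h with ⟨hx, hxs⟩
      clear h
      by_cases hge : x ≥ g
      · have hz : ∀ y ∈ xs, max (g - y) 0 = 0 := by
          intro y hy; have := hx y hy; omega
        have : (xs.map (fun t => max (g - t) 0)).sum = 0 := by
          rw [List.sum_eq_zero]; intro z hz'
          rcases List.mem_map.mp hz' with ⟨y, hy, rfl⟩; exact hz y hy
        simp [deficitLoop, hge, this]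
      · simp only [deficitLoop, if_neg hge, List.map_cons, List.sum_cons]
        rw [ih _ hxs]
        have : max (g - x) 0 = g - x := by omega
        omega

theorem sum_abs_split (xs : List Int) :
    (xs.map (fun x => |x|)).sum
      = (xs.map (fun x => max x 0)).sum + (xs.map (fun x => max (-x) 0)).sum := by
  induction xs with
  | nil => simp
  | cons x l ih =>
      simp only [List.map_cons, List.sum_cons, ih]
      rcases abs_cases x with ⟨h1,h2⟩|⟨h1,h2⟩ <;> omega

theorem sum_pos_sub_neg (xs : List Int) :
    (xs.map (fun x => max x 0)).sum - (xs.map (fun x => max (-x) 0)).sum = xs.sum := by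
  induction xs with
  | nil => simp
  | cons x l ih => simp [List.map_cons, List.sum_cons]; omega

theorem sum_abs_eq_two_neg (xs : List Int) (h : xs.sum = 0) :
    (xs.map (fun x => |x|)).sum = 2 * (xs.map (fun x => max (-x) 0)).sum := by
  have h1 := sum_abs_split xs
  have h2 := sum_pos_sub_neg xs
  omega

theorem sum_map_sub (g : Int) (l : List Int) :
    (l.map (fun t => t - g)).sum = l.sum - g * l.length := by
  induction l with
  | nil => simp
  | cons x xs ih => simp [List.map_cons, List.sum_cons, ih]; ring

theorem sum_deficit_perm (g : Int) {l l' : List Int} (h : l'.Perm l) :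
    (l'.map (fun t => max (g - t) 0)).sum = (l.map (fun t => max (g - t) 0)).sum :=
  (h.map _).sum_eq

-- ===== VERDICT =====
theorem perfecte_koor_spec : Claim_equal_perfecte_koor := by
  intro l _ hne
  unfold Spec_perfecte_koor perfecte_koor perfecte_koor_alt
  simp only []
  have hfold : l.foldl (fun acc toon => acc + toon) 0 = l.sum := by
    simpa using foldl_add_map_sum id l 0
  rw [hfold]
  by_cases hmod : PySem.Int.mod l.sum (l.length : Int) = 0
  · rw [if_neg (by simp [hmod]), if_neg (by simp [hmod])]
    set g := PySem.Int.floordiv l.sum (l.length : Int) with hg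
    have hsum : g * (l.length : Int) = l.sum := by
      have := PySem.Int.floordiv_mul_add_mod l.sum (l.length : Int)
      rw [hmod, ← hg] at this
      omega
    have hzero : (l.map (fun t => t - g)).sum = 0 := by
      rw [sum_map_sub]
      have : g * (l.length : Int) = (l.length : Int) * g := by ring
      omega
    have habs : (l.map (fun t => |t - g|)).sum
        = 2 * (l.map (fun t => max (g - t) 0)).sum := by
      have := sum_abs_eq_two_neg (l.map (fun t => t - g)) hzero
      simpa [List.map_map, Function.comp_def, neg_sub] using this
    have hA : l.foldl (fun acc toon => acc + |toon - g|) 0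
        = (l.map (fun t => |t - g|)).sum := by
      simpa using foldl_add_map_sum (fun t => |t - g|) l 0
    have hB : deficitLoop g 0 (PySem.List.sorted l (fun x => x) false)
        = (l.map (fun t => max (g - t) 0)).sum := by
      rw [deficitLoop_sorted g _ 0 (by simpa using PySem.List.sorted_pairwise l (fun x => x))]
      simpa using sum_deficit_perm g (PySem.List.sorted_perm l (fun x => x) false)
    rw [hA, hB, habs]
    have : PySem.Int.floordiv (2 * (l.map (fun t => max (g - t) 0)).sum) 2
        = (l.map (fun t => max (g - t) 0)).sum := by
      rw [PySem.Int.floordiv_eq_ediv_of_pos (by omega)]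
      omega
    rw [this]
  · rw [if_pos (by simp [hmod]), if_pos (by simp [hmod])]
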